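-- pv_equiv track=rewrite | github.com/RevistaOktubre/costarica | material/textos.py | procesar_negritas
-- ===== SOURCE A (Python) =====
-- def procesar_negritas(texto):
--     """
--     Convierte segmentos encerrados en %...% a <strong>...</strong>.
--     Ejemplo: 'Esto es %importante%' -> 'Esto es <strong>importante</strong>'
--     """
--     resultado = ""
--     dentro = False
--     for char in texto:
--         if char == "%":
--             if dentro:
--                 resultado += "</strong>"
--             else:
--                 resultado += "<strong>"
--             dentro = not dentro
--         else:
--             resultado += char
--     return resultado
-- ===== SOURCE B (Python) =====
-- def procesar_negritas(texto):
--     """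
--     Convierte segmentos encerrados en %...% a <strong>...</strong>.
--     """
--     parts = texto.split("%")
--     pieces = [parts[0]]
--     for i, p in enumerate(parts[1:], 1):
--         pieces.append("<strong>" if i % 2 == 1 else "</strong>")
--         pieces.append(p)
--     return "".join(pieces)
-- ===== Notes on version B (the rewrite author's own statement) =====
-- stated objective: alternative
-- what changed: Replaces the per-character scan with a toggle flag (string concatenation per char) by one split on the marker character and a segment-level reassembly that picks the opening/closing tag from the segment index's parity, joined once at the end.
import Mathlib
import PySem

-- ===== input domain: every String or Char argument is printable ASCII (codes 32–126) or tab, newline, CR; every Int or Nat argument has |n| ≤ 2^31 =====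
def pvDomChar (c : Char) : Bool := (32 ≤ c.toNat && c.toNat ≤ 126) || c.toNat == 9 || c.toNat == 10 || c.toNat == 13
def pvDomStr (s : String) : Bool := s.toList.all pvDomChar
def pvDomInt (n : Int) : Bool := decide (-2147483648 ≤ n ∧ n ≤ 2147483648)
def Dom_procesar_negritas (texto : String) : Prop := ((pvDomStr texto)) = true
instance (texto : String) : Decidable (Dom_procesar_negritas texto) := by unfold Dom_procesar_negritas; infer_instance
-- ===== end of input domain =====

-- B replaces A's per-character toggle scan with split-on-'%' plus parity-tagged reassembly; same cost, different decomposition.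


-- ===== PORT A =====
-- resultado is kept as a List Char, dentro as a Bool; the loop is a foldl over the characters.
def procesar_negritas (texto : String) : String :=
  let r := texto.toList.foldl
    (fun (st : List Char × Bool) c =>
      if c = '%' then
        (st.1 ++ (if st.2 then "</strong>".toList else "<strong>".toList), !st.2)
      else
        (st.1 ++ [c], st.2))
    ([], false)
  String.ofList r.1

-- ===== PORT B =====
-- texto.split("%") → PySem.Chars.splitOn; parts[0] → pyGetD; parts[1:] → PySem.List.slice; "".join → PySem.Chars.join.
def procesar_negritas_alt (texto : String) : String :=
  let parts := PySem.Chars.splitOn texto.toList ['%']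
  let pieces := (PySem.List.enumerate (PySem.List.slice parts (some 1) none) 1).foldl
    (fun (acc : List (List Char)) ip =>
      acc ++ [(if PySem.Int.mod ip.1 2 = 1 then "<strong>".toList else "</strong>".toList), ip.2])
    [PySem.List.pyGetD parts 0 []]
  String.ofList (PySem.Chars.join [] pieces)

-- ===== PRECONDITION & SPEC =====
def Spec_procesar_negritas (texto : String) (out : String) : Prop := out = procesar_negritas_alt texto
instance (texto : String) (out : String) : Decidable (Spec_procesar_negritas texto out) := by unfold Spec_procesar_negritas; infer_instance

-- ===== CLAIM (what is proved, stated in full; the proofs are below) =====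
def Claim_equal_procesar_negritas : Prop := ∀ (texto : String), Dom_procesar_negritas texto → Spec_procesar_negritas texto (procesar_negritas texto)

-- ===== LEMMAS AND PROOFS =====

/-- Accumulator-free split on '%': always returns a nonempty list of segments. -/
def split1 : List Char → List (List Char)
  | [] => [[]]
  | c :: t =>
    let r := split1 t
    if c = '%' then [] :: r else (c :: r.headI) :: r.tail

lemma split1_ne_nil (l : List Char) : split1 l ≠ [] := by
  cases l with
  | nil => simp [split1]
  | cons c t => simp [split1]; split <;> simp

/-- PySem's fueled split-on-"%" loop computes `split1` (accumulators made explicit). -/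
lemma go_eq : ∀ (fuel : Nat) (l cur : List Char) (acc : List (List Char)), l.length ≤ fuel →
    PySem.Chars.splitOn.go ['%'] fuel l cur acc
      = acc.reverse ++ (cur.reverse ++ (split1 l).headI) :: (split1 l).tail := by
  intro fuel
  induction fuel with
  | zero =>
    intro l cur acc h
    have : l = [] := List.eq_nil_of_length_eq_zero (Nat.le_zero.mp h)
    subst this
    simp [PySem.Chars.splitOn.go, split1]
  | succ n ih =>
    intro l cur acc h
    cases l with
    | nil => simp [PySem.Chars.splitOn.go, split1]
    | cons c rest =>
      by_cases hc : c = '%'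
      · subst hc
        rw [show PySem.Chars.splitOn.go ['%'] (n+1) ('%'::rest) cur acc
              = PySem.Chars.splitOn.go ['%'] n rest [] (cur.reverse :: acc) from by
            simp [PySem.Chars.splitOn.go, List.isPrefixOf]]
        rw [ih rest [] (cur.reverse :: acc) (by simpa using h)]
        obtain ⟨p, r, hr⟩ : ∃ p r, split1 rest = p :: r :=
          List.exists_cons_of_ne_nil (split1_ne_nil rest)
        simp [split1, hr]
      · rw [show PySem.Chars.splitOn.go ['%'] (n+1) (c::rest) cur acc
              = PySem.Chars.splitOn.go ['%'] n rest (c :: cur) acc from by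
            simp [PySem.Chars.splitOn.go, List.isPrefixOf]
            exact fun h' => absurd h'.symm hc]
        rw [ih rest (c :: cur) acc (by simpa using Nat.lt_succ_iff.mp (Nat.lt_of_lt_of_le (Nat.lt_succ_of_le (Nat.le_refl _)) h))]
        simp [split1, hc]

lemma splitOn_eq (s : List Char) :
    PySem.Chars.splitOn s ['%'] = (split1 s).headI :: (split1 s).tail := by
  have := go_eq (s.length + 1) s [] [] (Nat.le_succ _)
  simpa [PySem.Chars.splitOn] using this

/-- Reassembly of the remaining segments with alternating tags; `d` = A's `dentro` flag. -/
def renderTail : List (List Char) → Bool → List Char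
  | [], _ => []
  | p :: rest, d =>
      (if d then "</strong>".toList else "<strong>".toList) ++ p ++ renderTail rest (!d)

/-- A's toggle scan, from any accumulator and flag, in terms of `split1`/`renderTail`. -/
lemma scan_eq : ∀ (s : List Char) (res : List Char) (d : Bool),
    (s.foldl (fun (st : List Char × Bool) c =>
      if c = '%' then
        (st.1 ++ (if st.2 then "</strong>".toList else "<strong>".toList), !st.2)
      else
        (st.1 ++ [c], st.2)) (res, d)).1
      = res ++ (split1 s).headI ++ renderTail (split1 s).tail d := by
  intro s
  induction s with
  | nil => intro res d; simp [split1, renderTail]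
  | cons c t ih =>
    intro res d
    by_cases hc : c = '%'
    · subst hc
      obtain ⟨p, r, hr⟩ : ∃ p r, split1 t = p :: r :=
        List.exists_cons_of_ne_nil (split1_ne_nil t)
      simp only [List.foldl_cons, ih, split1, hr]
      simp [renderTail]
    · simp only [List.foldl_cons, ih, split1, hc, if_false]
      obtain ⟨p, r, hr⟩ : ∃ p r, split1 t = p :: r :=
        List.exists_cons_of_ne_nil (split1_ne_nil t)
      simp [hr]

/-- B's enumerate-and-tag loop, flattened, in terms of `renderTail` (flag = index parity). -/
lemma flatten_enum : ∀ (rest : List (List Char)) (i : Int) (pieces : List (List Char)),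
    ((PySem.List.enumerate rest i).foldl
      (fun (acc : List (List Char)) ip =>
        acc ++ [(if PySem.Int.mod ip.1 2 = 1 then "<strong>".toList else "</strong>".toList), ip.2])
      pieces).flatten
      = pieces.flatten ++ renderTail rest (decide (PySem.Int.mod i 2 = 0)) := by
  intro rest
  induction rest with
  | nil => intro i pieces; simp [PySem.List.enumerate, renderTail]
  | cons p r ih =>
    intro i pieces
    rw [PySem.List.enumerate_cons, List.foldl_cons, ih]
    have hm : PySem.Int.mod i 2 = i % 2 := PySem.Int.mod_eq_emod_of_pos (by norm_num)
    have hm1 : PySem.Int.mod (i+1) 2 = (i+1) % 2 := PySem.Int.mod_eq_emod_of_pos (by norm_num)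
    by_cases h : i % 2 = 0
    · have h1 : (i+1) % 2 = 1 := by omega
      simp [renderTail, h, h1]
    · have h0 : i % 2 = 1 := by omega
      have h1 : (i+1) % 2 = 0 := by omega
      simp [renderTail, h0, h1]

-- ===== VERDICT (by name: the statement is the Claim_ definition above) =====
theorem procesar_negritas_spec : Claim_equal_procesar_negritas := by
  intro texto _
  show String.ofList (texto.toList.foldl
      (fun (st : List Char × Bool) c =>
        if c = '%' then
          (st.1 ++ (if st.2 then "</strong>".toList else "<strong>".toList), !st.2)
        else
          (st.1 ++ [c], st.2)) ([], false)).1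
    = procesar_negritas_alt texto
  simp only [procesar_negritas_alt]
  rw [splitOn_eq]
  rw [scan_eq]
  have hslice : PySem.List.slice ((split1 texto.toList).headI :: (split1 texto.toList).tail) (some 1) none
      = (split1 texto.toList).tail := by
    rw [PySem.List.slice_from _ (by norm_num)]
    simp
  rw [hslice]
  have hjoin : ∀ ps : List (List Char), PySem.Chars.join [] ps = ps.flatten := by
    intro ps
    simp only [PySem.Chars.join, List.intercalate]
    induction ps with
    | nil => simp
    | cons a t ih =>
      cases t with
      | nil => simp
      | cons b u => simpa [List.intersperse] using ih
  rw [hjoin, flatten_enum]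
  simp [PySem.List.pyGetD, PySem.List.pyGet?, PySem.List.pyIdx?, PySem.Int.mod]
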